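-- pv_equiv track=rewrite | github.com/AlaaLab/Dr-LLaVA | RLHF/models/reward_model.py | max_sequential_overlap
-- ===== SOURCE A (Python) =====
-- def max_sequential_overlap(list1):
--
--     list_of_lists = [[True, 'adequate', 'normal', 'no abnormality', 'normal'],
--                           [True, 'adequate', 'abnormal', 'myeloblasts', 'AML'],
--                           [True, 'adequate', 'abnormal', 'plasma cells', 'MM'],
--                           [False, 'blood', 'inadequate','inadequate','inadequate'],
--                           [False, 'clot', 'inadequate','inadequate','inadequate']]
--     max_overlap = 0
--     list_length = len(list1)
--
--     for lst in list_of_lists: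
--         for i in range(list_length):
--             # Check the overlap starting from each index of list1
--             overlap = 0
--             for j in range(i, list_length):
--                 if list1[j] == lst[j]:
--                     overlap += 1
--                 else:
--                     break
--             max_overlap = max(max_overlap, overlap)
--
--     return max_overlap
-- ===== SOURCE B (Python) =====
-- def max_sequential_overlap(list1):
--     # Single forward pass per reference list: keep a running match counter,
--     # reset on mismatch, track the global best. Same IndexError behaviour as
--     # the original when len(list1) > 5 (lst[j] is accessed unconditionally).
--     list_of_lists = [[True, 'adequate', 'normal', 'no abnormality', 'normal'],
--                      [True, 'adequate', 'abnormal', 'myeloblasts', 'AML'],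
--                      [True, 'adequate', 'abnormal', 'plasma cells', 'MM'],
--                      [False, 'blood', 'inadequate', 'inadequate', 'inadequate'],
--                      [False, 'clot', 'inadequate', 'inadequate', 'inadequate']]
--     best = 0
--     for lst in list_of_lists:
--         run = 0
--         for j in range(len(list1)):
--             if list1[j] == lst[j]:
--                 run += 1
--                 if run > best:
--                     best = run
--             else:
--                 run = 0
--     return best
-- ===== Notes on version B (the rewrite author's own statement) =====
-- stated objective: simpler
-- what changed: Replaces A's restart-at-every-start-index scan (max over i of the leading-match run from i) by a single forward pass per reference list with a running match counter that resets on mismatch and updates a global best.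
import Mathlib
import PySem

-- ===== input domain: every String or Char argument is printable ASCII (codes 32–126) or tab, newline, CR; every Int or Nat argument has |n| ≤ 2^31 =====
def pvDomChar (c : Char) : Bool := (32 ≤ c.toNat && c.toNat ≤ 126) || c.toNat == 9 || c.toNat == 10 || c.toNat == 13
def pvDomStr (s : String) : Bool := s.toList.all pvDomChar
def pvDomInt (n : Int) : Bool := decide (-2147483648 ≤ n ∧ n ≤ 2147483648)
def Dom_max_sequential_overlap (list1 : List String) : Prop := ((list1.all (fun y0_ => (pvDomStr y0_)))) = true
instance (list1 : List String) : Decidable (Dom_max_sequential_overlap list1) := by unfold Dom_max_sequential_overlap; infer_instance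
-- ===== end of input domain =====

-- B replaces A's quadratic restart-at-every-index scan by one linear pass per
-- reference list with a running counter (objective: simpler).

-- ===== PORT A =====
-- The Python reference lists mix bools and strings; a Python string never
-- equals a bool, so the bool entries are ported as `none` (matches no string).
def pvRefs : List (List (Option String)) :=
  [[none, some "adequate", some "normal", some "no abnormality", some "normal"],
   [none, some "adequate", some "abnormal", some "myeloblasts", some "AML"],
   [none, some "adequate", some "abnormal", some "plasma cells", some "MM"],
   [none, some "blood", some "inadequate", some "inadequate", some "inadequate"],
   [none, some "clot", some "inadequate", some "inadequate", some "inadequate"]]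

-- A's inner j-loop with break: leading-match count along the remaining indices.
-- `pyGetD lst j none` is exact under Pre_ (j < len(list1) ≤ 5 keeps lst[j] in range;
-- Python raises IndexError beyond, excluded by Pre_); list1[j] is always in range.
def pvOverlapFrom (list1 : List String) (lst : List (Option String)) : List Int → Int
  | [] => 0
  | j :: js =>
    if PySem.List.pyGetD lst j none = some (PySem.List.pyGetD list1 j "") then
      1 + pvOverlapFrom list1 lst js
    else 0

def max_sequential_overlap (list1 : List String) : Int :=
  let list_length : Int := (list1.length : Int)
  pvRefs.foldl (fun max_overlap lst =>
    (PySem.List.pyRange 0 list_length 1).foldl (fun m i =>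
      max m (pvOverlapFrom list1 lst (PySem.List.pyRange i list_length 1))) max_overlap) 0

-- ===== PORT B =====
def max_sequential_overlap_alt (list1 : List String) : Int :=
  let n : Int := (list1.length : Int)
  pvRefs.foldl (fun best lst =>
    ((PySem.List.pyRange 0 n 1).foldl (fun (st : Int × Int) j =>
      if PySem.List.pyGetD lst j none = some (PySem.List.pyGetD list1 j "") then
        (st.1 + 1, if st.1 + 1 > st.2 then st.1 + 1 else st.2)
      else (0, st.2)) (0, best)).2) 0

-- ===== PRECONDITION & SPEC =====
-- Pre_ excludes len(list1) > 5, on which the Python A (and B) raise IndexError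
-- when indexing the 5-element reference lists.
def Pre_max_sequential_overlap (list1 : List String) : Prop := list1.length ≤ 5
instance (list1 : List String) : Decidable (Pre_max_sequential_overlap list1) := by
  unfold Pre_max_sequential_overlap; infer_instance
def pvWitness_max_sequential_overlap : List String := ["clot", "adequate"]

def Spec_max_sequential_overlap (list1 : List String) (out : Int) : Prop := out = max_sequential_overlap_alt list1
instance (list1 : List String) (out : Int) : Decidable (Spec_max_sequential_overlap list1 out) := by unfold Spec_max_sequential_overlap; infer_instance

-- ===== CLAIM (what is proved, stated in full; the proofs are below) =====
def Claim_equal_max_sequential_overlap : Prop := ∀ (list1 : List String), Dom_max_sequential_overlap list1 → Pre_max_sequential_overlap list1 → Spec_max_sequential_overlap list1 (max_sequential_overlap list1)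

-- ===== LEMMAS AND PROOFS =====

lemma pvOverlapFrom_nonneg (l1 : List String) (r : List (Option String)) :
    ∀ js : List Int, 0 ≤ pvOverlapFrom l1 r js := by
  intro js; induction js with
  | nil => simp [pvOverlapFrom]
  | cons j js ih => simp only [pvOverlapFrom]; split <;> omega

-- max over all start indices i ∈ [a, n) of the leading-match count from i
def pvM (l1 : List String) (r : List (Option String)) (a n : Int) : Int :=
  if _h : a < n then
    max (pvOverlapFrom l1 r (PySem.List.pyRange a n 1)) (pvM l1 r (a + 1) n)
  else 0
termination_by (n - a).toNat
decreasing_by omega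

lemma pvM_nonneg (l1 : List String) (r : List (Option String)) :
    ∀ k (a n : Int), (n - a).toNat = k → 0 ≤ pvM l1 r a n := by
  intro k
  induction k with
  | zero => intro a n hk; rw [pvM]; simp [show ¬ a < n by omega]
  | succ k ih =>
    intro a n hk; rw [pvM]
    by_cases h : a < n
    · have h1 := ih (a + 1) n (by omega)
      have h2 := pvOverlapFrom_nonneg l1 r (PySem.List.pyRange a n 1)
      simp only [dif_pos h]
      omega
    · simp [h]

lemma pvOverlapFrom_le_pvM (l1 : List String) (r : List (Option String))
    {a n : Int} (h : a ≤ n) :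
    pvOverlapFrom l1 r (PySem.List.pyRange a n 1) ≤ pvM l1 r a n := by
  by_cases h' : a < n
  · rw [pvM]; simp [h']
  · rw [PySem.List.pyRange_one_eq_nil (by omega), pvM]
    simp [h', pvOverlapFrom]

lemma A_side (l1 : List String) (r : List (Option String)) :
    ∀ k (a n acc : Int), (n - a).toNat = k → 0 ≤ acc →
      (PySem.List.pyRange a n 1).foldl (fun m i =>
        max m (pvOverlapFrom l1 r (PySem.List.pyRange i n 1))) acc
      = max acc (pvM l1 r a n) := by
  intro k
  induction k with
  | zero =>
    intro a n acc hk hacc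
    rw [PySem.List.pyRange_one_eq_nil (by omega), pvM]
    simp only [List.foldl_nil, dif_neg (show ¬ a < n by omega)]
    omega
  | succ k ih =>
    intro a n acc hk hacc
    have h : a < n := by omega
    rw [PySem.List.pyRange_one_cons h]
    simp only [List.foldl_cons]
    have hov := pvOverlapFrom_nonneg l1 r (PySem.List.pyRange a n 1)
    rw [ih (a + 1) n _ (by omega) (by omega)]
    conv_rhs => rw [pvM, dif_pos h]
    omega

lemma B_side (l1 : List String) (r : List (Option String)) :
    ∀ k (a n run best : Int), (n - a).toNat = k → 0 ≤ run → run ≤ best →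
      ((PySem.List.pyRange a n 1).foldl (fun (st : Int × Int) j =>
        if PySem.List.pyGetD r j none = some (PySem.List.pyGetD l1 j "") then
          (st.1 + 1, if st.1 + 1 > st.2 then st.1 + 1 else st.2)
        else (0, st.2)) (run, best)).2
      = max (max best (run + pvOverlapFrom l1 r (PySem.List.pyRange a n 1))) (pvM l1 r a n) := by
  intro k
  induction k with
  | zero =>
    intro a n run best hk h0 hrb
    rw [PySem.List.pyRange_one_eq_nil (by omega), pvM]
    simp only [List.foldl_nil, pvOverlapFrom, dif_neg (show ¬ a < n by omega)]
    omega
  | succ k ih =>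
    intro a n run best hk h0 hrb
    have h : a < n := by omega
    have hcons : PySem.List.pyRange a n 1 = a :: PySem.List.pyRange (a + 1) n 1 :=
      PySem.List.pyRange_one_cons h
    have hM1 : 0 ≤ pvM l1 r (a + 1) n := pvM_nonneg l1 r (n - (a + 1)).toNat (a + 1) n rfl
    have hov1 := pvOverlapFrom_nonneg l1 r (PySem.List.pyRange (a + 1) n 1)
    have hle1 : pvOverlapFrom l1 r (PySem.List.pyRange (a + 1) n 1) ≤ pvM l1 r (a + 1) n :=
      pvOverlapFrom_le_pvM l1 r (by omega)
    rw [pvM]; simp only [dif_pos h]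
    rw [hcons]
    simp only [List.foldl_cons, pvOverlapFrom]
    by_cases hc : PySem.List.pyGetD r a none = some (PySem.List.pyGetD l1 a "")
    · simp only [if_pos hc]
      rw [ih (a + 1) n (run + 1) (if run + 1 > best then run + 1 else best) (by omega)
            (by omega) (by split <;> omega)]
      split <;> omega
    · simp only [if_neg hc]
      rw [ih (a + 1) n 0 best (by omega) le_rfl (by omega)]
      omega

lemma per_ref (l1 : List String) (r : List (Option String)) (acc : Int) (hacc : 0 ≤ acc) :
    ((PySem.List.pyRange 0 (l1.length : Int) 1).foldl (fun (st : Int × Int) j =>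
        if PySem.List.pyGetD r j none = some (PySem.List.pyGetD l1 j "") then
          (st.1 + 1, if st.1 + 1 > st.2 then st.1 + 1 else st.2)
        else (0, st.2)) (0, acc)).2
    = (PySem.List.pyRange 0 (l1.length : Int) 1).foldl (fun m i =>
        max m (pvOverlapFrom l1 r (PySem.List.pyRange i (l1.length : Int) 1))) acc := by
  rw [B_side l1 r ((l1.length : Int) - 0).toNat 0 (l1.length : Int) 0 acc rfl le_rfl hacc,
      A_side l1 r ((l1.length : Int) - 0).toNat 0 (l1.length : Int) acc rfl hacc]
  have hle := pvOverlapFrom_le_pvM l1 r (show (0 : Int) ≤ (l1.length : Int) by omega)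
  have hM := pvM_nonneg l1 r ((l1.length : Int) - 0).toNat 0 (l1.length : Int) rfl
  omega

lemma outer (l1 : List String) :
    ∀ (refs : List (List (Option String))) (acc : Int), 0 ≤ acc →
      refs.foldl (fun max_overlap lst =>
        (PySem.List.pyRange 0 (l1.length : Int) 1).foldl (fun m i =>
          max m (pvOverlapFrom l1 lst (PySem.List.pyRange i (l1.length : Int) 1))) max_overlap) acc
      = refs.foldl (fun best lst =>
        ((PySem.List.pyRange 0 (l1.length : Int) 1).foldl (fun (st : Int × Int) j =>
          if PySem.List.pyGetD lst j none = some (PySem.List.pyGetD l1 j "") then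
            (st.1 + 1, if st.1 + 1 > st.2 then st.1 + 1 else st.2)
          else (0, st.2)) (0, best)).2) acc := by
  intro refs
  induction refs with
  | nil => intro acc _; rfl
  | cons r rs ih =>
    intro acc hacc
    simp only [List.foldl_cons]
    rw [← per_ref l1 r acc hacc]
    apply ih
    rw [per_ref l1 r acc hacc,
        A_side l1 r ((l1.length : Int) - 0).toNat 0 (l1.length : Int) acc rfl hacc]
    have := pvM_nonneg l1 r ((l1.length : Int) - 0).toNat 0 (l1.length : Int) rfl
    omega

-- ===== VERDICT (by name: the statement is the Claim_ definition above) =====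
theorem max_sequential_overlap_spec : Claim_equal_max_sequential_overlap := by
  intro list1 _ _
  unfold Spec_max_sequential_overlap max_sequential_overlap max_sequential_overlap_alt
  exact outer list1 pvRefs 0 le_rfl
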